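-- pv_equiv track=rewrite | github.com/WoolieM/show_case | src/Data_Lineage/utility.py | checking_db_name
-- ===== SOURCE A (Python) =====
-- from typing import Set, List, Dict, Union
--
-- def checking_db_name(
--     db_name: str,
--     schema_name: str,
--     table_list: List[str]
-- ) -> List[str]:
--     """Removes server name prefix and deduplicates (optimized).
--
--     Handles table names in 'dbo.table_name' or 'db_name.dbo.table_name'.
--     Deduplicates the list only if it has 2 or more elements.
--
--     Args:
--         db_name: The db name.
--         schema_name: The schema name.
--         table_list: The list of table names.
--
--     Returns:
--         A new list with the db name prefix removed and duplicates removed.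
--         Returns the original list if it has less than 2 elements.
--     """
--
--     if len(table_list) < 2:  # Optimized: Check length first
--         return table_list  # Return original if short
--
--     db_prefix  = (db_name + ".")
--     db_schema_prefix = (db_prefix + schema_name + ".")
--     seen: Set[str] = set()
--     result: List[str] = []
--
--     for table in table_list:
--         if table.startswith(db_schema_prefix):
--             new_table_name = table[len(db_prefix):]
--             if new_table_name not in seen:
--                 result.append(new_table_name)
--                 seen.add(new_table_name)
--         else:
--             if table not in seen:
--                 result.append(table)
--                 seen.add(table)
--
--     return result
-- ===== SOURCE B (Python) =====
-- def checking_db_name(db_name, schema_name, table_list):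
--     if len(table_list) < 2:
--         return table_list
--     db_prefix = db_name + "."
--     db_schema_prefix = db_prefix + schema_name + "."
--     pending = [t[len(db_prefix):] if t.startswith(db_schema_prefix) else t
--                for t in table_list]
--     result = []
--     while pending:
--         head = pending[0]
--         result.append(head)
--         pending = [x for x in pending[1:] if x != head]
--     return result
-- ===== Notes on version B (the rewrite author's own statement) =====
-- stated objective: alternative
-- what changed: B replaces A's seen-set bookkeeping entirely: after a prefix-stripping map pass it deduplicates by repeatedly emitting the head of the pending list and filtering out all of its duplicates from the remainder, so no auxiliary membership structure is kept.
import Mathlib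
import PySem

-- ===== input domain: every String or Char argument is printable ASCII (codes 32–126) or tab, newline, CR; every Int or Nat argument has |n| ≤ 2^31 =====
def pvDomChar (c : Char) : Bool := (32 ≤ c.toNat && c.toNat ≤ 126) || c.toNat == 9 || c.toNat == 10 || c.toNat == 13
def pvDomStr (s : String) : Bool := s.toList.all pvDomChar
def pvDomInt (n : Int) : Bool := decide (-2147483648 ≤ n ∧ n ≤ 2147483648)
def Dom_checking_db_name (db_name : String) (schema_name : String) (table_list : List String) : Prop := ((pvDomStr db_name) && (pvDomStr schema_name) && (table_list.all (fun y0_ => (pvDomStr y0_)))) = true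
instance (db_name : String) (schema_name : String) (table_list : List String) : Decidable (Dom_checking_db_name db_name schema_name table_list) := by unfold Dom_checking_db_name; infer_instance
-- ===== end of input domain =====

-- B drops A's seen-set bookkeeping: after a prefix-stripping map pass it deduplicates by repeatedly emitting the head of the pending list and filtering its duplicates out of the remainder (alternative algorithm; same result).

-- ===== PORT A =====
def checking_db_name (db_name : String) (schema_name : String) (table_list : List String) : List String :=
  if table_list.length < 2 then table_list
  else
    let db_prefix := db_name ++ "."
    let db_schema_prefix := db_prefix ++ schema_name ++ "."
    let st := table_list.foldl (fun (st : PySem.Set String × List String) table =>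
      if PySem.Str.startswith table db_schema_prefix then
        let new_table_name := PySem.Str.slice table (some (PySem.Str.len db_prefix : Int)) none
        if PySem.Set.contains st.1 new_table_name then st
        else (PySem.Set.add st.1 new_table_name, st.2 ++ [new_table_name])
      else
        if PySem.Set.contains st.1 table then st
        else (PySem.Set.add st.1 table, st.2 ++ [table])) (PySem.Set.empty, [])
    st.2

-- ===== PORT B =====
-- B's while loop over the shrinking 'pending' list, as the obvious well-founded recursion
def pvFilterDedup (pending : List String) : List String :=
  match pending with
  | [] => []
  | head :: rest => head :: pvFilterDedup (rest.filter (fun x => !(x == head)))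
termination_by pending.length
decreasing_by
  simp only [List.length_unattach, List.length_cons]
  exact Nat.lt_succ_of_le (le_trans (List.length_filter_le _ _) (by simp))

def checking_db_name_alt (db_name : String) (schema_name : String) (table_list : List String) : List String :=
  if table_list.length < 2 then table_list
  else
    let db_prefix := db_name ++ "."
    let db_schema_prefix := db_prefix ++ schema_name ++ "."
    let pending := table_list.map (fun t =>
      if PySem.Str.startswith t db_schema_prefix then
        PySem.Str.slice t (some (PySem.Str.len db_prefix : Int)) none
      else t)
    pvFilterDedup pending

-- ===== PRECONDITION & SPEC =====
def Spec_checking_db_name (db_name : String) (schema_name : String) (table_list : List String) (out : List String) : Prop := out = checking_db_name_alt db_name schema_name table_list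
instance (db_name : String) (schema_name : String) (table_list : List String) (out : List String) : Decidable (Spec_checking_db_name db_name schema_name table_list out) := by unfold Spec_checking_db_name; infer_instance

-- ===== CLAIM =====
def Claim_equal_checking_db_name : Prop := ∀ (db_name : String) (schema_name : String) (table_list : List String), Dom_checking_db_name db_name schema_name table_list → Spec_checking_db_name db_name schema_name table_list (checking_db_name db_name schema_name table_list)

-- ===== LEMMAS AND PROOFS =====
lemma pvFilterDedup_cons (h : String) (t : List String) :
    pvFilterDedup (h :: t) = h :: pvFilterDedup (t.filter (fun x => !(x == h))) := by
  rw [pvFilterDedup]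

-- A's interleaved loop computes PySem.Set.ofList of the stripped names (paired with itself)
lemma cdb_loop (dp dsp : String) :
    ∀ (l : List String) (seen : List String),
    l.foldl (fun (st : PySem.Set String × List String) table =>
      if PySem.Str.startswith table dsp then
        let new_table_name := PySem.Str.slice table (some (PySem.Str.len dp : Int)) none
        if PySem.Set.contains st.1 new_table_name then st
        else (PySem.Set.add st.1 new_table_name, st.2 ++ [new_table_name])
      else
        if PySem.Set.contains st.1 table then st
        else (PySem.Set.add st.1 table, st.2 ++ [table])) (seen, seen)
    = (let r := (l.map (fun t =>
        if PySem.Str.startswith t dsp then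
          PySem.Str.slice t (some (PySem.Str.len dp : Int)) none
        else t)).foldl PySem.Set.add seen
       (r, r)) := by
  intro l
  induction l with
  | nil => intro seen; rfl
  | cons a tl ih =>
    intro seen
    simp only [List.foldl_cons, List.map_cons]
    have hstep : ∀ (y : String),
        (if PySem.Set.contains seen y then ((seen : PySem.Set String), seen)
         else (PySem.Set.add seen y, seen ++ [y]))
        = (PySem.Set.add seen y, PySem.Set.add seen y) := by
      intro y
      by_cases h : y ∈ seen <;>
        simp [PySem.Set.add, PySem.Set.contains, h]
    by_cases hs : PySem.Str.startswith a dsp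
    · simp only [hs, if_true]
      rw [hstep]
      exact ih _
    · simp only [hs, if_false, Bool.false_eq_true]
      rw [hstep]
      exact ih _

-- B's filter-based dedup computes the seen-set fold: generalized over the accumulator
lemma filterDedup_foldl : ∀ (n : ℕ) (xs : List String), xs.length ≤ n →
    ∀ (acc : List String),
    xs.foldl PySem.Set.add acc = acc ++ pvFilterDedup (xs.filter (fun x => !acc.contains x)) := by
  intro n
  induction n with
  | zero =>
    intro xs hxs acc
    have : xs = [] := List.eq_nil_of_length_eq_zero (Nat.le_zero.mp hxs)
    subst this; simp [pvFilterDedup]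
  | succ n ih =>
    intro xs hxs acc
    match xs with
    | [] => simp [pvFilterDedup]
    | a :: t =>
      simp only [List.foldl_cons]
      by_cases hc : acc.contains a
      · have ha : a ∈ acc := by simpa using hc
        have hadd : PySem.Set.add acc a = acc := by
          simp only [PySem.Set.add, PySem.Set.contains]
          exact if_pos (by exact List.elem_eq_true_of_mem ha)
        rw [hadd, ih t (Nat.le_of_succ_le_succ hxs) acc]
        simp only [List.filter_cons]
        congr 1
        simp [ha]
      · have ha : a ∉ acc := by simpa using hc
        have hadd : PySem.Set.add acc a = acc ++ [a] := by
          simp only [PySem.Set.add, PySem.Set.contains]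
          exact if_neg hc
        rw [hadd, ih t (Nat.le_of_succ_le_succ hxs) (acc ++ [a])]
        have hfil : t.filter (fun x => !(acc ++ [a]).contains x)
            = (t.filter (fun x => !acc.contains x)).filter (fun x => !(x == a)) := by
          rw [List.filter_filter]
          apply List.filter_congr
          intro x _
          by_cases h1 : x ∈ acc <;> by_cases h2 : x = a <;> simp [h1, h2]
        simp only [List.filter_cons]
        have hb : (!acc.contains a) = true := by simp [ha]
        rw [hb, if_pos rfl, pvFilterDedup_cons, hfil]
        simp

lemma filterDedup_eq_ofList (xs : List String) :
    pvFilterDedup xs = PySem.Set.ofList xs := by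
  have := filterDedup_foldl xs.length xs (le_refl _) []
  simp only [PySem.Set.ofList, PySem.Set.empty] at this ⊢
  rw [this, List.nil_append]
  congr 1
  exact (List.filter_eq_self.mpr (fun x _ => rfl)).symm

-- ===== VERDICT =====
theorem checking_db_name_spec : Claim_equal_checking_db_name := by
  intro db_name schema_name table_list _
  unfold Spec_checking_db_name checking_db_name checking_db_name_alt
  by_cases h : table_list.length < 2
  · simp [h]
  · simp only [h, if_false]
    rw [filterDedup_eq_ofList, PySem.Set.ofList_eq_foldl]
    have := cdb_loop (db_name ++ ".") (db_name ++ "." ++ schema_name ++ ".") table_list []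
    simp only [PySem.Set.empty] at *
    rw [this]
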